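-- pv_equiv track=rewrite | github.com/TheOriginalSoni/pyramid | pyramid.py | filter_doubleletters_2diff
-- ===== SOURCE A (Python) =====
-- import itertools
-- from collections import Counter
--
-- def filter_doubleletters_2diff(words,yn):
-- 	fs = set()
-- 	for word in words:
-- 		a = [''.join(g) for _, g in itertools.groupby(word)]
-- 		b = len(Counter(''.join(list(map(lambda x: x[0] if (len(x)>=2) else "",a)))))
-- 		if yn:
-- 			if(b>=2):
-- 				fs.add(word)
-- 		else:
-- 			if(not b>=2):
-- 				fs.add(word)
-- 	return fs
-- ===== SOURCE B (Python) =====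
-- def filter_doubleletters_2diff(words, yn):
--     fs = set()
--     for word in words:
--         doubled = set()
--         for x, y in zip(word, word[1:]):
--             if x == y:
--                 doubled.add(x)
--         b = len(doubled)
--         if yn:
--             if b >= 2:
--                 fs.add(word)
--         else:
--             if not b >= 2:
--                 fs.add(word)
--     return fs
-- ===== Notes on version B (the rewrite author's own statement) =====
-- stated objective: simpler
-- what changed: Replaces the groupby-into-runs + join + map + Counter pipeline with a direct scan of adjacent character pairs collecting doubled letters into a set.
import Mathlib
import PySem

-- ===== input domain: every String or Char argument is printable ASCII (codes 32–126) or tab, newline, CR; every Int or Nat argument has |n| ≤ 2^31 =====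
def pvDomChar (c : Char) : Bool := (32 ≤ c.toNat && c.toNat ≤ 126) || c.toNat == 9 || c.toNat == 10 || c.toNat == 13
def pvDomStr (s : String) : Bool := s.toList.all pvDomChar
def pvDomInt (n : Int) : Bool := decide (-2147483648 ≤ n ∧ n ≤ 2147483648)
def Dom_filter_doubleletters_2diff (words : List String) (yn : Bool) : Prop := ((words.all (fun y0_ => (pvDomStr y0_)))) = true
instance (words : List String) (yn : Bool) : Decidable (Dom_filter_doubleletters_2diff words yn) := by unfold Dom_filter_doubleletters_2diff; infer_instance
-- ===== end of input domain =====

-- B replaces A's groupby/join/Counter pipeline by a direct adjacent-pair scan into a set (simpler).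


-- ===== PORT A =====
-- itertools.groupby(word): the consecutive runs of equal characters, each run as its list of chars
-- (''.join(g) in A only ever meets len() and [0], so runs stay List Char; words themselves stay String).
def pyGroupbyGo (c : Char) (cur : List Char) : List Char → List (List Char)
  | [] => [cur.reverse]
  | x :: xs => if x == c then pyGroupbyGo c (x :: cur) xs else cur.reverse :: pyGroupbyGo x [x] xs

def pyGroupby : List Char → List (List Char)
  | [] => []
  | c :: rest => pyGroupbyGo c [c] rest

-- fs = set(); for word in words: a = runs; b = len(Counter(join(map(lambda x: x[0] if len(x)>=2 else "", a)))); add per yn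
def filter_doubleletters_2diff (words : List String) (yn : Bool) : List String :=
  words.foldl (fun fs word =>
    let a : List (List Char) := pyGroupby word.toList
    -- lambda x: x[0] if (len(x)>=2) else ""  — x[0] as a one-character string is x.take 1 (runs are nonempty)
    let mapped : List (List Char) := a.map (fun x => if 2 ≤ x.length then x.take 1 else [])
    let joined : List Char := mapped.flatten            -- ''.join(...)
    let b : Int := ((PySem.Dict.counter joined).size : Int)     -- len(Counter(...))
    if yn then (if 2 ≤ b then PySem.Set.add fs word else fs)
    else (if ¬ 2 ≤ b then PySem.Set.add fs word else fs)) PySem.Set.empty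

-- ===== PORT B =====
-- fs = set(); for word: doubled = set(); for x,y in zip(word, word[1:]): if x==y: doubled.add(x); b = len(doubled)
def filter_doubleletters_2diff_alt (words : List String) (yn : Bool) : List String :=
  words.foldl (fun fs word =>
    let doubled : PySem.Set Char :=
      (word.toList.zip word.toList.tail).foldl
        (fun s p => if p.1 == p.2 then PySem.Set.add s p.1 else s) PySem.Set.empty
    let b : Int := PySem.Set.len doubled
    if yn then (if 2 ≤ b then PySem.Set.add fs word else fs)
    else (if ¬ 2 ≤ b then PySem.Set.add fs word else fs)) PySem.Set.empty

-- ===== PRECONDITION & SPEC =====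
def Spec_filter_doubleletters_2diff (words : List String) (yn : Bool) (out : List String) : Prop := out = filter_doubleletters_2diff_alt words yn
instance (words : List String) (yn : Bool) (out : List String) : Decidable (Spec_filter_doubleletters_2diff words yn out) := by unfold Spec_filter_doubleletters_2diff; infer_instance

-- ===== CLAIM (what is proved, stated in full; the proofs are below) =====
def Claim_equal_filter_doubleletters_2diff : Prop := ∀ (words : List String) (yn : Bool), Dom_filter_doubleletters_2diff words yn → Spec_filter_doubleletters_2diff words yn (filter_doubleletters_2diff words yn)

-- ===== LEMMAS AND PROOFS =====

lemma pyGroupbyGo_spec (rest : List Char) : ∀ (c : Char) (cur : List Char),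
    pyGroupbyGo c cur rest
      = (cur.reverse ++ rest.takeWhile (fun x => x == c)) :: pyGroupby (rest.dropWhile (fun x => x == c)) := by
  induction rest with
  | nil => intro c cur; simp [pyGroupbyGo, pyGroupby]
  | cons x xs ih =>
    intro c cur
    by_cases h : x = c
    · subst h
      simp only [pyGroupbyGo, beq_self_eq_true, if_pos, List.takeWhile, List.dropWhile]
      rw [ih]
      simp
    · have hb : (x == c) = false := by simp [h]
      simp [pyGroupbyGo, hb, List.takeWhile, List.dropWhile, pyGroupby]

lemma pyGroupby_cons (c : Char) (rest : List Char) :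
    pyGroupby (c :: rest)
      = (c :: rest.takeWhile (fun x => x == c)) :: pyGroupby (rest.dropWhile (fun x => x == c)) := by
  rw [show pyGroupby (c :: rest) = pyGroupbyGo c [c] rest from rfl, pyGroupbyGo_spec]
  simp

-- the doubled letters A finds (head of a run of length ≥ 2) are exactly the adjacent-pair letters
lemma mem_doubled_runs (l : List Char) (c' : Char) :
    (∃ r, r ∈ pyGroupby l ∧ 2 ≤ r.length ∧ c' ∈ r.take 1) ↔ (c', c') ∈ l.zip l.tail := by
  induction l with
  | nil => simp [pyGroupby]
  | cons a l' ih =>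
    cases l' with
    | nil => simp [pyGroupby, pyGroupbyGo]
    | cons b rest =>
      by_cases hab : b = a
      · subst hab
        rw [pyGroupby_cons]
        rw [pyGroupby_cons] at ih
        simp only [List.takeWhile, beq_self_eq_true, List.dropWhile] at *
        constructor
        · rintro ⟨r, hr, hlen, hc⟩
          simp only [List.mem_cons] at hr
          rcases hr with rfl | hr
          · simp only [List.take, List.mem_cons] at hc
            simp [List.zip, hc.resolve_right (by simp)]
          · have : (c', c') ∈ (b :: rest).zip (b :: rest).tail := by
              apply ih.mp
              exact ⟨r, by simp [hr], hlen, hc⟩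
            simp only [List.tail_cons] at this ⊢
            simp [List.zip] at this ⊢
            tauto
        · intro h
          simp only [List.tail_cons] at h
          rcases (by simpa [List.zip] using h : (c' = b ∧ c' = b) ∨ (c', c') ∈ (b :: rest).zip rest) with ⟨rfl, -⟩ | h2
          · exact ⟨c' :: c' :: rest.takeWhile (fun x => x == c'), by simp, by simp, by simp⟩
          · have := ih.mpr (by simpa using h2)
            rcases this with ⟨r, hr, hlen, hc⟩
            simp only [List.mem_cons] at hr
            rcases hr with rfl | hr
            · refine ⟨b :: b :: rest.takeWhile (fun x => x == b), by simp, by simp, ?_⟩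
              simpa [List.take] using hc
            · exact ⟨r, by simp [hr], hlen, hc⟩
      · rw [pyGroupby_cons]
        have hne : (b == a) = false := by simp [hab]
        simp only [List.takeWhile, hne, List.dropWhile]
        constructor
        · rintro ⟨r, hr, hlen, hc⟩
          simp only [List.mem_cons] at hr
          rcases hr with rfl | hr
          · simp at hlen
          · have := ih.mp ⟨r, hr, hlen, hc⟩
            simp only [List.tail_cons] at this ⊢
            simp [List.zip] at this ⊢
            tauto
        · intro h
          simp only [List.tail_cons] at h
          rcases (by simpa [List.zip] using h : (c' = a ∧ c' = b) ∨ (c', c') ∈ (b :: rest).zip rest) with ⟨rfl, rfl⟩ | h2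
          · exact absurd rfl hab
          · rcases ih.mpr (by simpa using h2) with ⟨r, hr, hlen, hc⟩
            exact ⟨r, by simp [hr], hlen, hc⟩

-- per word: A's len(Counter(...)) equals B's len(doubled)
lemma word_b_eq (l : List Char) :
    (((PySem.Dict.counter (((pyGroupby l).map (fun x => if 2 ≤ x.length then x.take 1 else [])).flatten)).size : Int))
      = PySem.Set.len
          ((l.zip l.tail).foldl (fun s p => if p.1 == p.2 then PySem.Set.add s p.1 else s) PySem.Set.empty) := by
  have hB : (l.zip l.tail).foldl (fun s p => if p.1 == p.2 then PySem.Set.add s p.1 else s) PySem.Set.empty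
      = PySem.Set.ofList (((l.zip l.tail).filter (fun p => p.1 == p.2)).map Prod.fst) := by
    rw [PySem.List.foldl_if_eq_foldl_filter (p := fun p : Char × Char => p.1 == p.2)
        (f := fun s p => PySem.Set.add s p.1)]
    rw [← PySem.Set.update_map_eq_foldl_add]
    exact PySem.Set.update_nil_left _
  rw [hB]
  have hsize : ∀ (d : PySem.Dict Char Int), d.size = d.keys.length := by
    intro d; simp [PySem.Dict.size, PySem.Dict.keys]
  rw [hsize, PySem.Dict.keys_counter]
  have key : (PySem.Set.ofList (((pyGroupby l).map (fun x => if 2 ≤ x.length then x.take 1 else [])).flatten)).length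
      = (PySem.Set.ofList (((l.zip l.tail).filter (fun p => p.1 == p.2)).map Prod.fst)).length := by
    apply List.Perm.length_eq
    rw [List.perm_ext_iff_of_nodup (PySem.Set.nodup_ofList _) (PySem.Set.nodup_ofList _)]
    intro c'
    rw [PySem.Set.mem_ofList, PySem.Set.mem_ofList]
    have hA : c' ∈ ((pyGroupby l).map (fun x => if 2 ≤ x.length then x.take 1 else [])).flatten
      ↔ (∃ r, r ∈ pyGroupby l ∧ 2 ≤ r.length ∧ c' ∈ r.take 1) := by
      simp only [List.mem_flatten, List.mem_map]
      constructor
      · rintro ⟨m, ⟨r, hr, rfl⟩, hc⟩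
        by_cases h2 : 2 ≤ r.length
        · exact ⟨r, hr, h2, by simpa [h2] using hc⟩
        · simp [h2] at hc
      · rintro ⟨r, hr, h2, hc⟩
        exact ⟨r.take 1, ⟨r, hr, by simp [h2]⟩, hc⟩
    have hBmem : c' ∈ ((l.zip l.tail).filter (fun p => p.1 == p.2)).map Prod.fst
        ↔ (c', c') ∈ l.zip l.tail := by
      simp only [List.mem_map, List.mem_filter]
      constructor
      · rintro ⟨⟨x, y⟩, ⟨hmem, heq⟩, rfl⟩
        simp only [beq_iff_eq] at heq
        simpa [← heq] using hmem
      · intro h; exact ⟨(c', c'), ⟨h, by simp⟩, rfl⟩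
    rw [hA, hBmem, mem_doubled_runs]
  simp only [PySem.Set.len, key]

-- ===== VERDICT (by name: the statement is the Claim_ definition above) =====
theorem filter_doubleletters_2diff_spec : Claim_equal_filter_doubleletters_2diff := by
  intro words yn _
  unfold Spec_filter_doubleletters_2diff filter_doubleletters_2diff filter_doubleletters_2diff_alt
  apply PySem.List.foldl_congr_mem
  intro fs word _
  simp only [word_b_eq]
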